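-- pv_equiv track=rewrite | github.com/veronicavazquez7737/macs4200-book | chapters/toolkit.py | trithemiusEncipher
-- ===== SOURCE A (Python) =====
-- def textClean( text ):
--     LETTERS = 'ABCDEFGHIJKLMNOPQRSTUVWXYZ'
--     text = text.upper()
--     cleaned = ''
--     for char in text:
--         if char in LETTERS:
--             cleaned += char
--     return cleaned
--
-- def textBlock( text ):
--     text = textClean( text )
--     blocked = ''
--     for i in range(0, len(text), 5):
--         blocked += text[i:i+5] + ' '
--     return blocked[:-1]
--
-- def trithemiusEncipher( text, start, direction, step):
--     plaintext = textClean( text )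
--     LETTERS = 'ABCDEFGHIJKLMNOPQRSTUVWXYZ'
--     ciphertext = ''
--     keystream = ''
--
--     counter = start
--     while len(keystream) != len(plaintext):
--         keystream += LETTERS[counter]
--         counter = ( counter + (direction * step) ) % 26
--
--     for i in range(0, len(plaintext)):
--         keyValue = LETTERS.find(keystream[i])
--         plaintextValue = LETTERS.find(plaintext[i])
--         ciphertext += LETTERS[ (plaintextValue + keyValue) % 26 ]
--
--     return textBlock(ciphertext)
-- ===== SOURCE B (Python) =====
-- def textClean( text ):
--     LETTERS = 'ABCDEFGHIJKLMNOPQRSTUVWXYZ'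
--     text = text.upper()
--     cleaned = ''
--     for char in text:
--         if char in LETTERS:
--             cleaned += char
--     return cleaned
--
-- def textBlock( text ):
--     text = textClean( text )
--     blocked = ''
--     for i in range(0, len(text), 5):
--         blocked += text[i:i+5] + ' '
--     return blocked[:-1]
--
-- def trithemiusEncipher( text, start, direction, step):
--     LETTERS = 'ABCDEFGHIJKLMNOPQRSTUVWXYZ'
--     ciphertext = ''
--     counter = start % 26
--     for char in textClean( text ):
--         ciphertext += LETTERS[ (LETTERS.find(char) + counter) % 26 ]
--         counter = ( counter + direction * step ) % 26
--     return textBlock(ciphertext)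
-- ===== Notes on version B (the rewrite author's own statement) =====
-- stated objective: simpler
-- what changed: B fuses A's two passes into a single loop over the cleaned plaintext, maintaining the key counter directly and never materialising the intermediate keystream string.
import Mathlib
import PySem

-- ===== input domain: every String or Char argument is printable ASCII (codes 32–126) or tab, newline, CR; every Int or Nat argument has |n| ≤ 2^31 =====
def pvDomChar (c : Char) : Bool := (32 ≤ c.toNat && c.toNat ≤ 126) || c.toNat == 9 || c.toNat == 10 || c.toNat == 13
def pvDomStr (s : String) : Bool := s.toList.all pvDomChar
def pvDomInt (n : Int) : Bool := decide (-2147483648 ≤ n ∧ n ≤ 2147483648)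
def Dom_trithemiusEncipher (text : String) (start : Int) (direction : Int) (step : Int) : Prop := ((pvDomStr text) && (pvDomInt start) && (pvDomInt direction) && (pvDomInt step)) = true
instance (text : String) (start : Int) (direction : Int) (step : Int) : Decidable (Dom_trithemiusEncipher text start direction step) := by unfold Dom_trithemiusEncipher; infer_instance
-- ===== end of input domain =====

-- B fuses A's two passes (keystream construction + index-zip encryption) into one loop over the
-- cleaned plaintext carrying the key counter, never building the keystream; return values agree on Pre_.


-- ===== PORT A =====
def pvLETTERS : List Char := "ABCDEFGHIJKLMNOPQRSTUVWXYZ".toList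

-- textClean: upper-case, keep only the characters found in LETTERS
def pvTextClean (t : List Char) : List Char :=
  (PySem.Chars.upper t).foldl
    (fun cleaned ch => if PySem.Chars.isIn [ch] pvLETTERS then cleaned ++ [ch] else cleaned) []

-- textBlock: re-clean, then append 5-character slices each followed by a space, dropping the last char
def pvTextBlock (t : List Char) : List Char :=
  let tc := pvTextClean t
  PySem.List.slice
    ((PySem.List.pyRange 0 (tc.length : Int) 5).foldl
      (fun blocked i => blocked ++ PySem.List.slice tc (some i) (some (i + 5)) ++ [' ']) [])
    none (some (-1))

-- A's while loop: it appends one char per iteration, so it runs exactly (len plaintext) times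
def pvKsLoop (direction step : Int) : Nat → Int → List Char
  | 0, _ => []
  | Nat.succ n, counter =>
      (PySem.List.pyGet? pvLETTERS counter).getD 'A'
        :: pvKsLoop direction step n (PySem.Int.mod (counter + direction * step) 26)

def trithemiusEncipher (text : String) (start : Int) (direction : Int) (step : Int) : String :=
  let plaintext := pvTextClean text.toList
  let keystream := pvKsLoop direction step plaintext.length start
  let ciphertext := (PySem.List.pyRange 0 (plaintext.length : Int) 1).foldl
    (fun ct i =>
      ct ++ [(PySem.List.pyGet? pvLETTERS
        (PySem.Int.mod
          (PySem.Chars.find pvLETTERS [(PySem.List.pyGet? plaintext i).getD 'A']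
            + PySem.Chars.find pvLETTERS [(PySem.List.pyGet? keystream i).getD 'A']) 26)).getD 'A']) []
  String.ofList (pvTextBlock ciphertext)

-- ===== PORT B =====
-- B's single loop: encrypt each cleaned character from the running counter, no keystream built
def pvEncLoop (direction step : Int) : List Char → Int → List Char
  | [], _ => []
  | ch :: rest, counter =>
      (PySem.List.pyGet? pvLETTERS
        (PySem.Int.mod (PySem.Chars.find pvLETTERS [ch] + counter) 26)).getD 'A'
        :: pvEncLoop direction step rest (PySem.Int.mod (counter + direction * step) 26)

def trithemiusEncipher_alt (text : String) (start : Int) (direction : Int) (step : Int) : String :=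
  String.ofList (pvTextBlock
    (pvEncLoop direction step (pvTextClean text.toList) (PySem.Int.mod start 26)))

-- ===== PRECONDITION & SPEC =====
-- Pre_ excludes exactly the inputs where A raises IndexError: text contains an ASCII letter (so the
-- keystream loop runs) while start lies outside Python's valid index range [-26, 25] for LETTERS.
def Pre_trithemiusEncipher (text : String) (start : Int) (direction : Int) (step : Int) : Prop :=
  text.toList.all
      (fun c => !((decide ('A' ≤ c) && decide (c ≤ 'Z')) || (decide ('a' ≤ c) && decide (c ≤ 'z')))) = true
    ∨ (-26 ≤ start ∧ start ≤ 25)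
instance (text : String) (start : Int) (direction : Int) (step : Int) : Decidable (Pre_trithemiusEncipher text start direction step) := by unfold Pre_trithemiusEncipher; infer_instance

def pvWitness_trithemiusEncipher : String × Int × Int × Int := ("Hello", 3, 1, 1)

def Spec_trithemiusEncipher (text : String) (start : Int) (direction : Int) (step : Int) (out : String) : Prop := out = trithemiusEncipher_alt text start direction step
instance (text : String) (start : Int) (direction : Int) (step : Int) (out : String) : Decidable (Spec_trithemiusEncipher text start direction step out) := by unfold Spec_trithemiusEncipher; infer_instance

-- ===== CLAIM (what is proved, stated in full; the proofs are below) =====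
def Claim_equal_trithemiusEncipher : Prop := ∀ (text : String) (start : Int) (direction : Int) (step : Int), Dom_trithemiusEncipher text start direction step → Pre_trithemiusEncipher text start direction step → Spec_trithemiusEncipher text start direction step (trithemiusEncipher text start direction step)


-- ===== LEMMAS AND PROOFS =====

-- every character of LETTERS is an upper-case letter
lemma pv_letters_mem (x : Char) (hx : x ∈ pvLETTERS) : 'A' ≤ x ∧ x ≤ 'Z' := by
  have h : pvLETTERS.all (fun x => decide ('A' ≤ x) && decide (x ≤ 'Z')) = true := by decide
  have := List.all_eq_true.mp h x hx
  simpa using this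

-- the key value A reads back from LETTERS[counter] is counter % 26, for any valid Python index
lemma pv_key_fact : ∀ c : Int, -26 ≤ c → c ≤ 25 →
    PySem.Chars.find pvLETTERS [(PySem.List.pyGet? pvLETTERS c).getD 'A'] = PySem.Int.mod c 26 := by
  intro c h1 h2
  interval_cases c <;> decide

lemma pv_ksLoop_length (d s : Int) : ∀ (n : Nat) (c : Int), (pvKsLoop d s n c).length = n := by
  intro n
  induction n with
  | zero => intro c; rfl
  | succ m ih => intro c; simp [pvKsLoop, ih]

-- cleaning a letter-free string yields the empty string
lemma pv_clean_nil (t : List Char)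
    (h : t.all (fun c => !((decide ('A' ≤ c) && decide (c ≤ 'Z'))
        || (decide ('a' ≤ c) && decide (c ≤ 'z')))) = true) : pvTextClean t = [] := by
  unfold pvTextClean
  rw [PySem.List.foldl_append_if (fun ch => PySem.Chars.isIn [ch] pvLETTERS) (fun x => x)
      (PySem.Chars.upper t) []]
  simp only [List.nil_append, List.map_id']
  rw [List.filter_eq_nil_iff]
  intro a ha
  simp only [PySem.Chars.upper, List.mem_map] at ha
  obtain ⟨c, hc, rfl⟩ := ha
  have hnc := List.all_eq_true.mp h c hc
  simp only [Bool.not_or, Bool.and_eq_true, Bool.not_eq_true',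
    Bool.and_eq_false_iff, decide_eq_false_iff_not] at hnc
  intro hin
  have hmem : PySem.Chars.upperChar c ∈ pvLETTERS := by
    have := (PySem.Chars.isIn_iff_infix _ _).mp hin
    exact (List.singleton_infix_iff _ _).mp this
  have hb := pv_letters_mem _ hmem
  by_cases hl : PySem.Chars.islower c = true
  · have hl' : 'a' ≤ c ∧ c ≤ 'z' := by simpa [PySem.Chars.islower] using hl
    rcases hnc.2 with h' | h' <;> exact h' (by tauto)
  · have : PySem.Chars.upperChar c = c := by simp [PySem.Chars.upperChar, hl]
    rw [this] at hb
    rcases hnc.1 with h' | h' <;> exact h' (by tauto)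

-- A's index fold over two equal-length lists is the zipWith of their suffixes
lemma pv_map_range_zip (F : Char → Char → Char) :
    ∀ (n k : Nat) (ks p : List Char), ks.length = k + n → p.length = k + n →
    (PySem.List.pyRange (k : Int) ((k + n : Nat) : Int) 1).map
      (fun i => F ((PySem.List.pyGet? p i).getD 'A') ((PySem.List.pyGet? ks i).getD 'A'))
    = List.zipWith F (p.drop k) (ks.drop k) := by
  intro n
  induction n with
  | zero =>
    intro k ks p hks hp
    have hr : PySem.List.pyRange (k : Int) ((k + 0 : Nat) : Int) 1 = [] := by
      rw [List.eq_nil_iff_forall_not_mem]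
      intro i hi
      rw [PySem.List.mem_pyRange_one] at hi
      omega
    rw [hr, List.map_nil]
    rw [List.drop_eq_nil_of_le (by omega), List.drop_eq_nil_of_le (by omega)]
    rfl
  | succ n ih =>
    intro k ks p hks hp
    have hklt : (k : Int) < ((k + (n + 1) : Nat) : Int) := by push_cast; omega
    rw [PySem.List.pyRange_one_cons hklt, List.map_cons]
    rw [List.drop_eq_getElem_cons (show k < p.length by omega),
        List.drop_eq_getElem_cons (show k < ks.length by omega), List.zipWith_cons_cons]
    have hcast : (k : Int) + 1 = ((k + 1 : Nat) : Int) := by push_cast; ring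
    have hcast2 : ((k + (n + 1) : Nat) : Int) = (((k + 1) + n : Nat) : Int) := by push_cast; ring
    rw [hcast, hcast2, ih (k + 1) ks p (by omega) (by omega)]
    congr 1
    simp [(show k < p.length by omega), (show k < ks.length by omega)]

-- fused-loop invariant: zipping A's keystream against the plaintext is B's single loop
lemma pv_ks_zip (d s : Int) : ∀ (p : List Char) (c : Int), -26 ≤ c → c ≤ 25 →
    List.zipWith
      (fun pc kc => (PySem.List.pyGet? pvLETTERS
        (PySem.Int.mod (PySem.Chars.find pvLETTERS [pc] + PySem.Chars.find pvLETTERS [kc]) 26)).getD 'A')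
      p (pvKsLoop d s p.length c)
    = pvEncLoop d s p (PySem.Int.mod c 26) := by
  intro p
  induction p with
  | nil => intro c _ _; rfl
  | cons ch rest ih =>
    intro c h1 h2
    have h26 : (0 : Int) < 26 := by norm_num
    simp only [List.length_cons, pvKsLoop, pvEncLoop, List.zipWith_cons_cons]
    have hb1 : (-26 : Int) ≤ PySem.Int.mod (c + d * s) 26 := by
      have := PySem.Int.mod_nonneg (c + d * s) h26; omega
    have hb2 : PySem.Int.mod (c + d * s) 26 ≤ 25 := by
      have := PySem.Int.mod_lt (c + d * s) h26; omega
    rw [pv_key_fact c h1 h2, ih _ hb1 hb2]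
    have hmm : PySem.Int.mod (PySem.Int.mod (c + d * s) 26) 26
        = PySem.Int.mod (PySem.Int.mod c 26 + d * s) 26 := by
      rw [PySem.Int.mod_eq_emod_of_pos h26, PySem.Int.mod_eq_emod_of_pos h26,
          PySem.Int.mod_eq_emod_of_pos h26, PySem.Int.mod_eq_emod_of_pos h26]
      omega
    rw [hmm]

-- ===== VERDICT (by name: the statement is the Claim_ definition above) =====
theorem trithemiusEncipher_spec : Claim_equal_trithemiusEncipher := by
  intro text start direction step _ hPre
  unfold Spec_trithemiusEncipher
  simp only [trithemiusEncipher, trithemiusEncipher_alt]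
  rw [PySem.List.foldl_append_singleton_eq_map, List.nil_append]
  have hzip := pv_map_range_zip
    (fun pc kc => (PySem.List.pyGet? pvLETTERS
      (PySem.Int.mod (PySem.Chars.find pvLETTERS [pc] + PySem.Chars.find pvLETTERS [kc]) 26)).getD 'A')
    (pvTextClean text.toList).length 0
    (pvKsLoop direction step (pvTextClean text.toList).length start)
    (pvTextClean text.toList)
    (by simp [pv_ksLoop_length]) (by simp)
  simp only [Nat.zero_add, Nat.cast_zero, List.drop_zero] at hzip
  rw [hzip]
  rcases hPre with hnol | hrange
  · rw [pv_clean_nil text.toList hnol]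
    rfl
  · congr 2
    exact pv_ks_zip direction step (pvTextClean text.toList) start hrange.1 hrange.2
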